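-- pv_equiv track=rewrite | github.com/JiwonDev/helloPython | v1/main.py | input_validator
-- ===== SOURCE A (Python) =====
-- def isOperator(token: str) -> bool:
--     operators = ['+', '-', '*', '/']
--     if token in operators:
--         return True
--     return False
--
-- def input_validator(tokens: list) -> bool:
--     # 1. operator로 token이 시작하고 끝나면 안된다.
--     # 2. digit과 operator가 교차되며 등장해야한다.
--     # TODO: operator와 digit을 판단하는 함수가 필요함.
--     if isOperator(tokens[0]) or isOperator(tokens[-1]) or len(tokens) < 2:
--         return False
--
--     isprevoperator = False
--
--     for tmp_token in tokens[1:]: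
--         tmp_operator = isOperator(tmp_token)
--         if isprevoperator == tmp_operator:
--             return False
--         isprevoperator = tmp_operator
--
--     return True
-- ===== SOURCE B (Python) =====
-- def isOperator(token: str) -> bool:
--     operators = ['+', '-', '*', '/']
--     if token in operators:
--         return True
--     return False
--
--
-- def _chain(rest: list) -> bool:
--     # grammar rule: rest must be a (possibly empty) sequence of
--     # (operator, operand) pairs, consumed two tokens at a time
--     if not rest:
--         return True
--     if len(rest) == 1:
--         return False
--     return isOperator(rest[0]) and not isOperator(rest[1]) and _chain(rest[2:])
--
--
-- def input_validator(tokens: list) -> bool: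
--     # recursive-descent view of the grammar  expr := operand (operator operand)*
--     if isOperator(tokens[0]) or isOperator(tokens[-1]) or len(tokens) < 2:
--         return False
--     return _chain(tokens[1:])
-- ===== Notes on version B (the rewrite author's own statement) =====
-- stated objective: alternative
-- what changed: Replaced A's single-step loop that threads a previous-was-operator flag across neighbours by a recursive-descent parser for the grammar 'operand (operator operand)*' that consumes tokens two at a time.
import Mathlib
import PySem

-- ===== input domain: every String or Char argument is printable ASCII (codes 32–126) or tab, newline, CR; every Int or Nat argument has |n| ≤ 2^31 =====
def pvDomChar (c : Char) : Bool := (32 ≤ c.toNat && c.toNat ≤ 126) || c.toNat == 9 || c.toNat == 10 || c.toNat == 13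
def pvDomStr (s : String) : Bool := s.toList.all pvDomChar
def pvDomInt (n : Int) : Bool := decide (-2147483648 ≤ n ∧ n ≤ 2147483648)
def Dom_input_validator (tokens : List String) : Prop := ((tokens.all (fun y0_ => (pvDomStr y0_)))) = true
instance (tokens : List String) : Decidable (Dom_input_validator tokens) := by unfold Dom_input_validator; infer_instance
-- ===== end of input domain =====

-- B replaces A's carried-flag neighbour loop by a recursive-descent parser for
-- the grammar 'operand (operator operand)*' consuming two tokens at a time (alternative, same cost).


-- shared helper: Python isOperator (identical in Source A and Source B)
def isOperator (token : String) : Bool :=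
  if token ∈ ["+", "-", "*", "/"] then true else false

-- ===== PORT A =====
-- A's for-loop over tokens[1:] with the carried flag and early return False
def loopA : List String → Bool → Bool
  | [], _ => true
  | t :: ts, isprevoperator =>
      let tmp_operator := isOperator t
      if isprevoperator == tmp_operator then false
      else loopA ts tmp_operator

def input_validator (tokens : List String) : Bool :=
  match PySem.List.pyGet? tokens 0, PySem.List.pyGet? tokens (-1) with
  | some t0, some tl =>
      if isOperator t0 || isOperator tl || decide (tokens.length < 2) then false
      else loopA (PySem.List.slice tokens (some 1) none) false
  | _, _ => false   -- unreachable under Pre_ (empty list: Python raises IndexError)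

-- ===== PORT B =====
-- Source B's _chain: consume (operator, operand) pairs two at a time
def chainB : List String → Bool
  | [] => true
  | [_] => false
  | r0 :: r1 :: rs => isOperator r0 && !isOperator r1 && chainB rs

def input_validator_alt (tokens : List String) : Bool :=
  match PySem.List.pyGet? tokens 0 with
  | none => false   -- unreachable under Pre_ (empty list: Python raises IndexError)
  | some t0 =>
    match PySem.List.pyGet? tokens (-1) with
    | none => false
    | some tl =>
      if isOperator t0 || isOperator tl || decide (tokens.length < 2) then false
      else chainB (PySem.List.slice tokens (some 1) none)

-- ===== PRECONDITION & SPEC =====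
-- Pre_ excludes only the empty list, on which A raises IndexError at tokens[0].
def Pre_input_validator (tokens : List String) : Prop := tokens ≠ []
instance (tokens : List String) : Decidable (Pre_input_validator tokens) := by unfold Pre_input_validator; infer_instance

def pvWitness_input_validator : List String := ["1", "+", "2"]

def Spec_input_validator (tokens : List String) (out : Bool) : Prop := out = input_validator_alt tokens
instance (tokens : List String) (out : Bool) : Decidable (Spec_input_validator tokens out) := by unfold Spec_input_validator; infer_instance

-- ===== CLAIM (what is proved, stated in full; the proofs are below) =====
def Claim_equal_input_validator : Prop := ∀ (tokens : List String), Dom_input_validator tokens → Pre_input_validator tokens → Spec_input_validator tokens (input_validator tokens)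

-- ===== LEMMAS AND PROOFS =====

-- A's carried-flag loop equals B's pair parser, provided the last token (if any) is not an operator.
lemma loopA_eq_chainB : ∀ (l : List String),
    (∀ x, l.getLast? = some x → isOperator x = false) → loopA l false = chainB l := by
  intro l
  induction l using chainB.induct with
  | case1 => intro _; rfl
  | case2 t =>
    intro h
    have ht : isOperator t = false := h t (by simp)
    simp [loopA, chainB, ht]
  | case3 r0 r1 rs ih =>
    intro h
    have hlast : ∀ x, rs.getLast? = some x → isOperator x = false := by
      intro x hx
      apply h
      cases rs with
      | nil => simp at hx
      | cons a as => simpa [List.getLast?_cons_cons] using hx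
    cases h0 : isOperator r0 <;> cases h1 : isOperator r1 <;>
      simp [loopA, chainB, h0, h1, ih hlast]

lemma pyGet?_zero_cons (t : String) (ts : List String) :
    PySem.List.pyGet? (t :: ts) 0 = some t := by
  simp [PySem.List.pyGet?, PySem.List.pyIdx?]

-- ===== VERDICT (by name: the statement is the Claim_ definition above) =====
theorem input_validator_spec : Claim_equal_input_validator := by
  intro tokens _ hpre
  unfold Spec_input_validator
  match tokens, hpre with
  | t0 :: rest, _ =>
    have hne : (t0 :: rest : List String) ≠ [] := by simp
    unfold input_validator input_validator_alt
    rw [pyGet?_zero_cons, PySem.List.pyGet?_neg_one, List.getLast?_eq_some_getLast hne,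
        PySem.List.slice_from_one]
    simp only [List.tail_cons]
    cases hguard : (isOperator t0 || isOperator ((t0 :: rest).getLast hne)
        || decide ((t0 :: rest : List String).length < 2)) with
    | true => simp
    | false =>
      simp only [Bool.false_eq_true, if_false]
      apply loopA_eq_chainB
      intro x hx
      simp only [Bool.or_eq_false_iff, decide_eq_false_iff_not] at hguard
      have : (t0 :: rest).getLast hne = x := by
        have : (t0 :: rest).getLast? = some x := by
          cases rest with
          | nil =>
            exfalso
            exact hguard.2 (by simp)
          | cons a as => simpa [List.getLast?_cons_cons] using hx
        rw [List.getLast?_eq_some_getLast hne] at this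
        exact Option.some.inj this
      rw [this] at hguard
      exact hguard.1.2
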